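-- pv_equiv track=rewrite | github.com/syncerpn/leetcode | 3921_score_validator.py | scoreValidator
-- ===== SOURCE A (Python) =====
-- def scoreValidator(events: list[str]) -> list[int]:
--     d = {c: int(c) for c in "0123456"}
--     s, c = 0, 0
--     for e in events:
--         if e in d:
--             s += d[e]
--         elif e == "W":
--             c += 1
--         elif e == "WD" or e == "NB":
--             s += 1
--         if c == 10:
--             break
--     return s, c
-- ===== SOURCE B (Python) =====
-- def scoreValidator(events):
--     # positions of all "W" events; the scored region ends just after the 10th one
--     wpos = [i for i, e in enumerate(events) if e == "W"]
--     cut = wpos[9] + 1 if len(wpos) >= 10 else len(events)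
--     pre = events[:cut]
--     SCORE = {str(i): i for i in range(1, 7)}
--     SCORE["WD"] = SCORE["NB"] = 1
--     return sum(v * pre.count(k) for k, v in SCORE.items()), min(len(wpos), 10)
-- ===== Notes on version B (the rewrite author's own statement) =====
-- stated objective: alternative
-- what changed: Replaces A's single stateful scan with break and per-element branching by index arithmetic: B lists the positions of "W", slices the events just past the 10th one, and computes the score as sum of value*count over the score table's tokens (per-token counting instead of per-event accumulation).
import Mathlib
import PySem

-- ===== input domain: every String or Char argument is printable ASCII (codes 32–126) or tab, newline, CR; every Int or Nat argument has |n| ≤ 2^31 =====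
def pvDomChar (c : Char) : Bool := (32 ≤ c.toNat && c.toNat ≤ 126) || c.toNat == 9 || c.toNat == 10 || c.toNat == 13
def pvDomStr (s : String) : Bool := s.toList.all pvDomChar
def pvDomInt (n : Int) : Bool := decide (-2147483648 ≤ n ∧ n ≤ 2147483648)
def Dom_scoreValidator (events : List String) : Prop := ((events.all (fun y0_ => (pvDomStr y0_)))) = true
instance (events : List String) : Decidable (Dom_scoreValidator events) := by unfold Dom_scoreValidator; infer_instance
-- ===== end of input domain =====

-- B replaces A's stateful scan-with-break by index arithmetic: it lists the positions of "W",
-- cuts the event list just after the 10th one, and scores by per-token counting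
-- (value × occurrence count for each scoring token); objective: alternative algorithm, not speed.

-- ===== PORT A =====
-- d = {c: int(c) for c in "0123456"} : the comprehension over the fixed literal, written out as its resulting dict
def pvDA : PySem.Dict String Int :=
  PySem.Dict.ofList [("0", 0), ("1", 1), ("2", 2), ("3", 3), ("4", 4), ("5", 5), ("6", 6)]

-- the 'for e in events' loop with its break; d[e] is guarded by 'e in d', so getD is exact
def pvGoA : List String → Int → Int → Int × Int
  | [], s, c => (s, c)
  | e :: rest, s, c =>
    let sc : Int × Int :=
      if pvDA.contains e then (s + pvDA.getD e 0, c)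
      else if e == "W" then (s, c + 1)
      else if e == "WD" || e == "NB" then (s + 1, c)
      else (s, c)
    if sc.2 == 10 then sc else pvGoA rest sc.1 sc.2

def scoreValidator (events : List String) : Int × Int := pvGoA events 0 0

-- ===== PORT B =====
-- SCORE = {str(i): i for i in range(1, 7)}; SCORE["WD"] = SCORE["NB"] = 1
def pvSCORE : PySem.Dict String Int :=
  (((PySem.List.pyRange 1 7 1).foldl (fun d i => d.insert (PySem.Int.toStr i) i) PySem.Dict.empty).insert
      "WD" 1).insert "NB" 1

def scoreValidator_alt (events : List String) : Int × Int :=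
  -- wpos = [i for i, e in enumerate(events) if e == "W"]
  let wpos : List Int := ((PySem.List.enumerate events 0).filter (fun p => p.2 == "W")).map (·.1)
  -- wpos[9] is guarded by len(wpos) >= 10, so the default of pyGetD is never returned
  let cut : Int := if wpos.length ≥ 10 then PySem.List.pyGetD wpos 9 0 + 1 else (events.length : Int)
  let pre := PySem.List.slice events none (some cut)
  (pvSCORE.items.foldl (fun a p => a + p.2 * (PySem.List.count pre p.1 : Int)) 0,
   min (wpos.length : Int) 10)

-- ===== PRECONDITION & SPEC =====
def Spec_scoreValidator (events : List String) (out : Int × Int) : Prop := out = scoreValidator_alt events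
instance (events : List String) (out : Int × Int) : Decidable (Spec_scoreValidator events out) := by unfold Spec_scoreValidator; infer_instance

-- ===== CLAIM (what is proved, stated in full; the proofs are below) =====
def Claim_equal_scoreValidator : Prop := ∀ (events : List String), Dom_scoreValidator events → Spec_scoreValidator events (scoreValidator events)

-- ===== LEMMAS AND PROOFS =====

-- the per-event score both programs realize
def pvVal (e : String) : Int :=
  if e = "1" then 1 else if e = "2" then 2 else if e = "3" then 3
  else if e = "4" then 4 else if e = "5" then 5 else if e = "6" then 6
  else if e = "WD" ∨ e = "NB" then 1 else 0

lemma pvDA_eq :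
    pvDA = PySem.Dict.mk [("0", 0), ("1", 1), ("2", 2), ("3", 3), ("4", 4), ("5", 5), ("6", 6)] := by
  decide

-- pointwise bridge: pvVal agrees with A's branch structure
lemma pvVal_spec (e : String) :
    pvVal e =
      if pvDA.contains e then pvDA.getD e 0
      else if e == "W" then 0
      else if e == "WD" || e == "NB" then 1
      else 0 := by
  by_cases h0 : e = "0"; · subst h0; decide
  by_cases h1 : e = "1"; · subst h1; decide
  by_cases h2 : e = "2"; · subst h2; decide
  by_cases h3 : e = "3"; · subst h3; decide
  by_cases h4 : e = "4"; · subst h4; decide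
  by_cases h5 : e = "5"; · subst h5; decide
  by_cases h6 : e = "6"; · subst h6; decide
  by_cases hW : e = "W"; · subst hW; decide
  by_cases hWD : e = "WD"; · subst hWD; decide
  by_cases hNB : e = "NB"; · subst hNB; decide
  simp [pvVal, pvDA_eq, PySem.Dict.contains, beq_iff_eq,
    h1, h2, h3, h4, h5, h6, hW, hWD, hNB,
    Ne.symm h0, Ne.symm h1, Ne.symm h2, Ne.symm h3, Ne.symm h4, Ne.symm h5, Ne.symm h6]

lemma pvDA_not_contains_W : pvDA.contains "W" = false := by decide
lemma pvVal_W : pvVal "W" = 0 := by decide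

-- score sum of a list under pvVal
def pvS (l : List String) : Int := (l.map pvVal).sum

lemma pvS_nil : pvS [] = 0 := rfl
lemma pvS_cons (e : String) (l : List String) : pvS (e :: l) = pvVal e + pvS l := by
  simp [pvS]

-- proof-side recursive form of the prefix through the k-th "W"
def pvPrefixW : List String → Int → List String
  | [], _ => []
  | head :: rest, k =>
    if head == "W" then
      if k == 1 then [head] else [head] ++ pvPrefixW rest (k - 1)
    else [head] ++ pvPrefixW rest k

lemma pvPrefixW_cons_not_W {e : String} (h : (e == "W") = false) (l : List String) (k : Int) :
    pvPrefixW (e :: l) k = e :: pvPrefixW l k := by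
  simp [pvPrefixW, h]

-- main characterization of A's loop
lemma pvGoA_eq (l : List String) : ∀ (s k : Int), 1 ≤ k → k ≤ 10 →
    pvGoA l s (10 - k) =
      (s + pvS (pvPrefixW l k), 10 - k + min (PySem.List.count l "W" : Int) k) := by
  induction l with
  | nil =>
    intro s k hk1 hk10
    simp [pvGoA, pvPrefixW, pvS, PySem.List.count]
    omega
  | cons e t ih =>
    intro s k hk1 hk10
    have h10 : ¬(10 - k : Int) = 10 := by omega
    by_cases hd : pvDA.contains e = true
    · have hWne : e ≠ "W" := by
        intro h; rw [h, pvDA_not_contains_W] at hd; exact absurd hd (by simp)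
      have hWb : (e == "W") = false := by simp [hWne]
      have hval : pvVal e = pvDA.getD e 0 := by rw [pvVal_spec, if_pos hd]
      have hstep : pvGoA (e :: t) s (10 - k) = pvGoA t (s + pvDA.getD e 0) (10 - k) := by
        simp [pvGoA, hd, beq_iff_eq, h10]
      have hcnt : PySem.List.count (e :: t) "W" = PySem.List.count t "W" := by
        simp [PySem.List.count, List.count_cons, hWb]
      rw [hstep, ih _ k hk1 hk10, pvPrefixW_cons_not_W hWb, pvS_cons, hval, hcnt]
      simp only [Prod.mk.injEq]
      exact ⟨by ring, trivial⟩
    · by_cases hW : e = "W"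
      · subst hW
        by_cases hk1' : k = 1
        · subst hk1'
          have hpre : pvPrefixW ("W" :: t) 1 = ["W"] := by simp [pvPrefixW]
          have hcnt : (PySem.List.count ("W" :: t) "W" : Int) =
              (PySem.List.count t "W" : Int) + 1 := by
            simp [PySem.List.count]
          have hstep : pvGoA ("W" :: t) s (10 - 1) = (s, 10) := by
            simp [pvGoA, pvDA_not_contains_W]
          rw [hstep, hpre, pvS_cons, pvVal_W, pvS_nil, hcnt]
          simp only [Prod.mk.injEq]
          exact ⟨by ring, by omega⟩
        · have hrec : pvPrefixW ("W" :: t) k = "W" :: pvPrefixW t (k - 1) := by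
            simp [pvPrefixW, beq_iff_eq]; omega
          have hcnt : (PySem.List.count ("W" :: t) "W" : Int) =
              (PySem.List.count t "W" : Int) + 1 := by
            simp [PySem.List.count]
          have h10' : ¬(10 - k + 1 : Int) = 10 := by omega
          have hstep : pvGoA ("W" :: t) s (10 - k) = pvGoA t s (10 - k + 1) := by
            simp [pvGoA, pvDA_not_contains_W, beq_iff_eq, h10']
          have hc : (10 - k + 1 : Int) = 10 - (k - 1) := by ring
          rw [hstep, hc, ih s (k - 1) (by omega) (by omega), hrec, pvS_cons, pvVal_W, hcnt]
          simp only [Prod.mk.injEq]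
          exact ⟨by ring, by omega⟩
      · have hWb : (e == "W") = false := by simp [hW]
        have hdb : pvDA.contains e = false := by simpa using hd
        have hcnt : PySem.List.count (e :: t) "W" = PySem.List.count t "W" := by
          simp [PySem.List.count, List.count_cons, hWb]
        by_cases hx : (e == "WD" || e == "NB") = true
        · have hval : pvVal e = 1 := by
            rw [pvVal_spec, if_neg (by simp [hdb]), if_neg (by simp [hWb]), if_pos hx]
          have hstep : pvGoA (e :: t) s (10 - k) = pvGoA t (s + 1) (10 - k) := by
            simp [pvGoA, hdb, hWb, hx, h10]
          rw [hstep, ih _ k hk1 hk10, pvPrefixW_cons_not_W hWb, pvS_cons, hval, hcnt]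
          simp only [Prod.mk.injEq]
          exact ⟨by ring, trivial⟩
        · have hxb : (e == "WD" || e == "NB") = false := by simpa using hx
          have hval : pvVal e = 0 := by
            rw [pvVal_spec, if_neg (by simp [hdb]), if_neg (by simp [hWb]), if_neg (by simp [hxb])]
          have hstep : pvGoA (e :: t) s (10 - k) = pvGoA t s (10 - k) := by
            simp [pvGoA, hdb, hWb, hxb, h10]
          rw [hstep, ih s k hk1 hk10, pvPrefixW_cons_not_W hWb, pvS_cons, hval, hcnt]
          simp only [Prod.mk.injEq]
          exact ⟨by ring, trivial⟩

-- proof-side positions of "W" as natural indices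
def pvWidx : List String → List Nat
  | [] => []
  | e :: t => if e = "W" then 0 :: (pvWidx t).map (· + 1) else (pvWidx t).map (· + 1)

lemma pvWidx_length (l : List String) : (pvWidx l).length = l.count "W" := by
  induction l with
  | nil => rfl
  | cons e t ih =>
    by_cases h : e = "W" <;> simp [pvWidx, h, ih]

-- B's wpos comprehension computes pvWidx (cast to Int, shifted by the enumerate start)
lemma pvWpos_eq (l : List String) : ∀ s : Int,
    ((PySem.List.enumerate l s).filter (fun p => p.2 == "W")).map (·.1) =
      (pvWidx l).map (fun n : Nat => s + (n : Int)) := by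
  induction l with
  | nil => intro s; simp [PySem.List.enumerate_nil, pvWidx]
  | cons e t ih =>
    intro s
    rw [PySem.List.enumerate_cons]
    by_cases h : e = "W"
    · subst h
      rw [show pvWidx ("W" :: t) = 0 :: (pvWidx t).map (· + 1) from by simp [pvWidx]]
      rw [List.filter_cons, if_pos (by simp), List.map_cons, List.map_cons, List.map_map,
        ih (s + 1)]
      refine congrArg₂ _ (by simp) ?_
      apply List.map_congr_left; intro n _; simp; ring
    · rw [show pvWidx (e :: t) = (pvWidx t).map (· + 1) from by simp [pvWidx, h]]
      rw [List.filter_cons, if_neg (by simp [h]), List.map_map, ih (s + 1)]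
      apply List.map_congr_left; intro n _; simp; ring

-- the cut B computes yields exactly the prefix through the k-th "W"
lemma pvTake_widx (l : List String) : ∀ k : Nat, 1 ≤ k →
    List.take (if k ≤ (pvWidx l).length then (pvWidx l).getD (k - 1) 0 + 1 else l.length) l =
      pvPrefixW l k := by
  induction l with
  | nil => intro k hk; simp [pvWidx, pvPrefixW]
  | cons e t ih =>
    intro k hk
    by_cases h : e = "W"
    · subst h
      by_cases hk1 : k = 1
      · subst hk1
        simp [pvWidx, pvPrefixW]
      · have h2 : 2 ≤ k := by omega
        have hcast : ((k - 1 : Nat) : Int) = (k : Int) - 1 := by omega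
        rw [show pvPrefixW ("W" :: t) k = "W" :: pvPrefixW t ((k : Int) - 1) from by
          simp [pvPrefixW, beq_iff_eq]; omega]
        rw [← hcast]
        have hlen : (pvWidx ("W" :: t)).length = (pvWidx t).length + 1 := by
          simp [pvWidx]
        rw [hlen]
        have hgd : k ≤ (pvWidx t).length + 1 →
            (pvWidx ("W" :: t)).getD (k - 1) 0 = (pvWidx t).getD (k - 2) 0 + 1 := by
          intro hle
          have hk2 : k - 2 < (pvWidx t).length := by omega
          have : k - 1 = (k - 2) + 1 := by omega
          simp [pvWidx, this, List.getD, List.getElem?_eq_getElem hk2]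
        by_cases hle : k ≤ (pvWidx t).length + 1
        · rw [if_pos hle, hgd hle, List.take_succ_cons]
          have := ih (k - 1) (by omega)
          rw [if_pos (by omega)] at this
          rw [show k - 1 - 1 = k - 2 from by omega] at this
          rw [this]
        · rw [if_neg hle]
          have := ih (k - 1) (by omega)
          rw [if_neg (by omega)] at this
          simp [List.take_succ_cons, this]
    · have hb : (e == "W") = false := by simp [h]
      rw [pvPrefixW_cons_not_W hb]
      have hlen : (pvWidx (e :: t)).length = (pvWidx t).length := by simp [pvWidx, h]
      have hgd : k ≤ (pvWidx t).length →
          (pvWidx (e :: t)).getD (k - 1) 0 = (pvWidx t).getD (k - 1) 0 + 1 := by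
        intro hle
        have hk2 : k - 1 < (pvWidx t).length := by omega
        simp [pvWidx, h, List.getD, List.getElem?_eq_getElem hk2]
      rw [hlen]
      by_cases hle : k ≤ (pvWidx t).length
      · rw [if_pos hle, hgd hle, List.take_succ_cons]
        have := ih k hk
        rw [if_pos hle] at this
        rw [this]
      · rw [if_neg hle]
        have := ih k hk
        rw [if_neg hle] at this
        simp [List.take_succ_cons, this]

-- B's per-token counting sum equals the per-event sum pvS
lemma pvCountSum (l : List String) :
    (1 * (PySem.List.count l "1" : Int) + 2 * (PySem.List.count l "2" : Int)
      + 3 * (PySem.List.count l "3" : Int) + 4 * (PySem.List.count l "4" : Int)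
      + 5 * (PySem.List.count l "5" : Int) + 6 * (PySem.List.count l "6" : Int)
      + 1 * (PySem.List.count l "WD" : Int) + 1 * (PySem.List.count l "NB" : Int)) = pvS l := by
  induction l with
  | nil => simp [PySem.List.count, pvS]
  | cons e t ih =>
    rw [pvS_cons, ← ih]
    simp only [PySem.List.count, List.count_cons] at *
    by_cases h1 : e = "1"; · subst h1; simp [pvVal]; ring
    by_cases h2 : e = "2"; · subst h2; simp [pvVal]; ring
    by_cases h3 : e = "3"; · subst h3; simp [pvVal]; ring
    by_cases h4 : e = "4"; · subst h4; simp [pvVal]; ring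
    by_cases h5 : e = "5"; · subst h5; simp [pvVal]; ring
    by_cases h6 : e = "6"; · subst h6; simp [pvVal]; ring
    by_cases hWD : e = "WD"; · subst hWD; simp [pvVal]; ring
    by_cases hNB : e = "NB"; · subst hNB; simp [pvVal]; ring
    have hv : pvVal e = 0 := by simp [pvVal, h1, h2, h3, h4, h5, h6, hWD, hNB]
    simp [h1, h2, h3, h4, h5, h6, hWD, hNB, hv]

lemma pvSCORE_items :
    pvSCORE.items = [("1", 1), ("2", 2), ("3", 3), ("4", 4), ("5", 5), ("6", 6),
      ("WD", 1), ("NB", 1)] := by decide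

-- B's result in closed form
lemma pvAlt_eq (events : List String) :
    scoreValidator_alt events =
      (pvS (pvPrefixW events 10), min (PySem.List.count events "W" : Int) 10) := by
  simp only [scoreValidator_alt, pvWpos_eq events 0, pvSCORE_items]
  have hlen : ((pvWidx events).map (fun n : Nat => (0 : Int) + (n : Int))).length
      = events.count "W" := by
    rw [List.length_map, pvWidx_length]
  rw [hlen]
  have hpre : PySem.List.slice events none
      (some (if events.count "W" ≥ 10 then
          PySem.List.pyGetD ((pvWidx events).map (fun n : Nat => (0 : Int) + (n : Int))) 9 0 + 1
        else (events.length : Int))) = pvPrefixW events 10 := by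
    by_cases hge : events.count "W" ≥ 10
    · have h9 : 9 < (pvWidx events).length := by rw [pvWidx_length]; omega
      have h9' : 9 < ((pvWidx events).map (fun n : Nat => (0 : Int) + (n : Int))).length := by
        rw [List.length_map]; exact h9
      have hgd : PySem.List.pyGetD ((pvWidx events).map (fun n : Nat => (0 : Int) + (n : Int))) 9 0
          = (((pvWidx events).getD 9 0 : Nat) : Int) := by
        rw [PySem.List.pyGetD_ofNat']
        simp [List.getD, List.getElem?_eq_getElem h9]
      rw [if_pos hge, hgd]
      have : (((pvWidx events).getD 9 0 : Nat) : Int) + 1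
          = (((pvWidx events).getD 9 0 + 1 : Nat) : Int) := by push_cast; ring
      rw [this, PySem.List.slice_to_natCast]
      have := pvTake_widx events 10 (by omega)
      rw [if_pos (by rw [pvWidx_length]; omega)] at this
      simpa using this
    · rw [if_neg hge, PySem.List.slice_to_natCast, List.take_length]
      have := pvTake_widx events 10 (by omega)
      rw [if_neg (by rw [pvWidx_length]; omega)] at this
      simpa using this
  rw [hpre]
  simp only [Prod.mk.injEq]
  constructor
  · simp only [List.foldl]
    rw [← pvCountSum (pvPrefixW events 10)]
    ring
  · simp [PySem.List.count]

-- ===== VERDICT (by name: the statement is the Claim_ definition above) =====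
theorem scoreValidator_spec : Claim_equal_scoreValidator := by
  intro events _
  unfold Spec_scoreValidator scoreValidator
  have h := pvGoA_eq events 0 10 (by norm_num) (le_refl 10)
  norm_num at h
  rw [h, pvAlt_eq]
  simp [PySem.List.count]
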